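-- pv_equiv track=rewrite | github.com/GNutma/Advent-of-Code-2024 | src/exercises/exercise_02.py | is_safe_report_with_tolerance
-- ===== SOURCE A (Python) =====
-- MAX_DIFFERENCE_BETWEEN_REPORT_NUMBERS = 3
--
-- def is_safe_report_with_tolerance(report_numbers: list[int]) -> bool:
--     """Check if a report is safe with a tolerance of one missing number.
--
--     Args:
--         report_numbers: A list of integers representing the report.
--
--     Returns:
--         True if the report is safe, False otherwise.
--     """
--     if is_safe_report(report_numbers):
--         return True
--
--     for index in range(len(report_numbers)):
--         report_numbers_ = report_numbers.copy()
--         report_numbers_.pop(index)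
--         if is_safe_report(report_numbers_):
--             return True
--     return False
--
-- def is_safe_report(report_numbers: list[int]) -> bool:
--     """Check if a report is safe.
--
--     Args:
--         report_numbers: A list of integers representing the report.
--
--     Returns:
--         True if the report is safe, False otherwise.
--     """
--     direction = None
--     for index in range(1, len(report_numbers)):
--         diff = report_numbers[index] - report_numbers[index - 1]
--         if diff == 0:
--             return False
--
--         if direction is None:
--             direction = diff > 0
--
--         if (diff > 0) != direction:
--             return False
--
--         if abs(diff) > MAX_DIFFERENCE_BETWEEN_REPORT_NUMBERS:
--             return False
--     return True
-- ===== SOURCE B (Python) =====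
-- def is_safe_report_with_tolerance(report_numbers: list[int]) -> bool:
--     """O(n): for each direction, find the first bad adjacent pair and test only
--     the two removals that can repair it."""
--
--     def band(s, d):
--         return 1 <= d <= 3 if s else -3 <= d <= -1
--
--     def ok(s, nums):
--         prev = None
--         for x in nums:
--             if prev is not None and not band(s, x - prev):
--                 return False
--             prev = x
--         return True
--
--     def first_bad(s, nums):
--         i = 0
--         prev = None
--         for x in nums:
--             if prev is not None:
--                 if not band(s, x - prev):
--                     return i
--                 i += 1
--             prev = x
--         return None
--
--     def tolerant(s):
--         i = first_bad(s, report_numbers)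
--         if i is None:
--             return True
--         return (ok(s, report_numbers[:i] + report_numbers[i + 1:])
--                 or ok(s, report_numbers[:i + 1] + report_numbers[i + 2:]))
--
--     return tolerant(True) or tolerant(False)
-- ===== Notes on version B (the rewrite author's own statement) =====
-- stated objective: faster
-- what changed: Instead of retrying the full safety scan after removing every index (O(n^2)), B checks each direction separately, finds the first violating adjacent pair, and tests only the two removals that can repair it, giving O(n).
import Mathlib
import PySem

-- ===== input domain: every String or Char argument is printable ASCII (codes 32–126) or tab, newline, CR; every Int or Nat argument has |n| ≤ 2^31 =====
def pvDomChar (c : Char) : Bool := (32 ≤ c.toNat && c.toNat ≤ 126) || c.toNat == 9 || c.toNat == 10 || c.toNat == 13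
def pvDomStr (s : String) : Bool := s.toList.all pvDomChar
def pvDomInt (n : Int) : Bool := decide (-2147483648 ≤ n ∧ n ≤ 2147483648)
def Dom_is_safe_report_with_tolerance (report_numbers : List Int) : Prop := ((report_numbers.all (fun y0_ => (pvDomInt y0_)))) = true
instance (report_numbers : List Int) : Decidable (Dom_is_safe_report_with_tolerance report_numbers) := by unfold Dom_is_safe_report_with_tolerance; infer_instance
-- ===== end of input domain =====

-- B replaces A's "retry the full safety scan after each of the n removals" (O(n^2)) by a
-- per-direction scan that finds the first violating adjacent pair and tests only the two
-- removals that can repair it (O(n)). Objective: faster (asymptotic).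

-- ===== PORT A =====
-- helper is_safe_report: loop over index 1..len-1 with the `direction` state (None at start).
def pvSafeAux (prev : Int) (dir : Option Bool) : List Int → Bool
  | [] => true
  | x :: t =>
    if x - prev = 0 then false
    else if (decide (0 < (x - prev))) != dir.getD (decide (0 < (x - prev))) then false
    else if 3 < (x - prev).natAbs then false
    else pvSafeAux x (some (dir.getD (decide (0 < (x - prev))))) t

def pvIsSafeReport : List Int → Bool
  | [] => true
  | x :: t => pvSafeAux x none t

-- A: safe as-is, else try popping each index (copy+pop(i) = eraseIdx i, exact for i < len).
def is_safe_report_with_tolerance (report_numbers : List Int) : Bool :=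
  if pvIsSafeReport report_numbers then true
  else (List.range report_numbers.length).any fun i => pvIsSafeReport (report_numbers.eraseIdx i)

-- ===== PORT B =====
-- band(s, d): the allowed diff range for direction s.
def pvBand (s : Bool) (d : Int) : Bool :=
  if s then decide (1 ≤ d ∧ d ≤ 3) else decide (-3 ≤ d ∧ d ≤ -1)

-- ok(s, nums): scan adjacent pairs, early-return False on a bad one.
def pvOk (s : Bool) : List Int → Bool
  | a :: x :: t => pvBand s (x - a) && pvOk s (x :: t)
  | _ => true

-- first_bad(s, nums): index of the first bad adjacent pair, None if all good.
def pvFirstBad (s : Bool) : List Int → Option Nat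
  | a :: x :: t => if pvBand s (x - a) then (pvFirstBad s (x :: t)).map (· + 1) else some 0
  | _ => none

-- tolerant(s): slices xs[:i]+xs[i+1:] and xs[:i+1]+xs[i+2:] ported as take/drop (exact: 0 ≤ i).
def pvTolerant (s : Bool) (xs : List Int) : Bool :=
  match pvFirstBad s xs with
  | none => true
  | some i =>
      pvOk s (xs.take i ++ xs.drop (i + 1)) || pvOk s (xs.take (i + 1) ++ xs.drop (i + 2))

def is_safe_report_with_tolerance_alt (report_numbers : List Int) : Bool :=
  pvTolerant true report_numbers || pvTolerant false report_numbers

-- ===== PRECONDITION & SPEC =====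
def Spec_is_safe_report_with_tolerance (report_numbers : List Int) (out : Bool) : Prop := out = is_safe_report_with_tolerance_alt report_numbers
instance (report_numbers : List Int) (out : Bool) : Decidable (Spec_is_safe_report_with_tolerance report_numbers out) := by unfold Spec_is_safe_report_with_tolerance; infer_instance

-- ===== CLAIM (what is proved, stated in full; the proofs are below) =====
def Claim_equal_is_safe_report_with_tolerance : Prop := ∀ (report_numbers : List Int), Dom_is_safe_report_with_tolerance report_numbers → Spec_is_safe_report_with_tolerance report_numbers (is_safe_report_with_tolerance report_numbers)

-- ===== LEMMAS AND PROOFS =====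

-- factor the early-return tail out of a chain of guard ifs
lemma ifs_factor (c1 c2 c3 : Prop) [Decidable c1] [Decidable c2] [Decidable c3] (K : Bool) :
    (if c1 then false else if c2 then false else if c3 then false else K)
      = ((if c1 then false else if c2 then false else if c3 then false else true) && K) := by
  split_ifs <;> simp

-- A's direction-stateful scan, once the direction is fixed, is the band check for that direction.
lemma safeAux_some : ∀ (t : List Int) (prev : Int) (b : Bool),
    pvSafeAux prev (some b) t = pvOk b (prev :: t) := by
  intro t
  induction t with
  | nil => intro prev b; simp [pvSafeAux, pvOk]
  | cons x t ih =>
    intro prev b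
    show pvSafeAux prev (some b) (x :: t) = (pvBand b (x - prev) && pvOk b (x :: t))
    simp only [pvSafeAux, Option.getD_some, ih]
    rw [ifs_factor]
    congr 1
    cases b <;> rw [Bool.eq_iff_iff] <;> simp [pvBand] <;> omega

-- A's scan from the initial None direction is the disjunction over the two directions.
lemma safeAux_none : ∀ (t : List Int) (prev : Int),
    pvSafeAux prev none t = (pvOk true (prev :: t) || pvOk false (prev :: t)) := by
  intro t prev
  cases t with
  | nil => simp [pvSafeAux, pvOk]
  | cons x t =>
    show pvSafeAux prev none (x :: t)
        = (pvBand true (x - prev) && pvOk true (x :: t)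
           || (pvBand false (x - prev) && pvOk false (x :: t)))
    simp only [pvSafeAux, Option.getD_none, bne_self_eq_false, safeAux_some]
    rcases lt_trichotomy (x - prev) 0 with h | h | h
    · have h1 : ¬ (x - prev = 0) := by omega
      have h2 : ¬ (0 < x - prev) := by omega
      simp only [h1, if_false, h2, decide_false] -- reduce the ifs
      have : pvBand true (x - prev) = false := by simp [pvBand]; omega
      rw [this]
      have : pvBand false (x - prev) = decide (¬ 3 < (x - prev).natAbs) := by
        rw [Bool.eq_iff_iff]; simp [pvBand]; omega
      rw [this]
      by_cases hb : 3 < (x - prev).natAbs <;> simp [hb]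
    · simp [h, pvBand]
    · have h1 : ¬ (x - prev = 0) := by omega
      simp only [h1, if_false, h, decide_true]
      have : pvBand false (x - prev) = false := by simp [pvBand]; omega
      rw [this]
      have : pvBand true (x - prev) = decide (¬ 3 < (x - prev).natAbs) := by
        rw [Bool.eq_iff_iff]; simp [pvBand]; omega
      rw [this]
      by_cases hb : 3 < (x - prev).natAbs <;> simp [hb]

lemma safe_char (xs : List Int) :
    pvIsSafeReport xs = (pvOk true xs || pvOk false xs) := by
  cases xs with
  | nil => simp [pvIsSafeReport, pvOk]
  | cons x t => exact safeAux_none t x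

-- pvOk as a universal statement about adjacent pairs.
lemma ok_iff (s : Bool) : ∀ (xs : List Int),
    pvOk s xs = true ↔ ∀ (k : Nat) (h : k + 1 < xs.length),
      pvBand s (xs[k + 1] - xs[k]'(by omega)) = true
  | [] => by simp [pvOk]
  | [a] => by simp [pvOk]
  | a :: x :: t => by
    rw [show pvOk s (a :: x :: t) = (pvBand s (x - a) && pvOk s (x :: t)) from rfl,
        Bool.and_eq_true, ok_iff s (x :: t)]
    constructor
    · rintro ⟨h0, h⟩ k hk
      cases k with
      | zero => simpa using h0
      | succ n =>
        have hn : n + 1 < (x :: t).length := by simpa using hk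
        simpa using h n hn
    · intro h
      refine ⟨by simpa using h 0 (by simp), fun k hk => ?_⟩
      have := h (k + 1) (by simpa using hk)
      simpa using this

lemma firstBad_none (s : Bool) : ∀ (xs : List Int),
    pvFirstBad s xs = none ↔ pvOk s xs = true
  | [] => by simp [pvFirstBad, pvOk]
  | [a] => by simp [pvFirstBad, pvOk]
  | a :: x :: t => by
    rw [show pvFirstBad s (a :: x :: t)
        = (if pvBand s (x - a) then (pvFirstBad s (x :: t)).map (· + 1) else some 0) from rfl,
        show pvOk s (a :: x :: t) = (pvBand s (x - a) && pvOk s (x :: t)) from rfl]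
    by_cases hb : pvBand s (x - a) = true
    · simp [hb, firstBad_none s (x :: t)]
    · simp [Bool.eq_false_iff.mpr hb]

lemma firstBad_some (s : Bool) : ∀ (xs : List Int) (i : Nat),
    pvFirstBad s xs = some i →
      ∃ (h : i + 1 < xs.length), pvBand s (xs[i + 1] - xs[i]'(by omega)) = false
  | [] => by simp [pvFirstBad]
  | [a] => by simp [pvFirstBad]
  | a :: x :: t => by
    intro i hi
    rw [show pvFirstBad s (a :: x :: t)
        = (if pvBand s (x - a) then (pvFirstBad s (x :: t)).map (· + 1) else some 0) from rfl] at hi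
    by_cases hb : pvBand s (x - a) = true
    · rw [if_pos hb] at hi
      rcases Option.map_eq_some_iff.mp hi with ⟨j, hj, rfl⟩
      rcases firstBad_some s (x :: t) j hj with ⟨h, hbad⟩
      exact ⟨by simpa using Nat.succ_lt_succ h, by simpa using hbad⟩
    · rw [if_neg hb] at hi
      cases hi
      exact ⟨by simp, Bool.eq_false_iff.mpr hb⟩

-- Persistence: a removal away from a bad pair leaves that pair (and hence unsafety) intact.
lemma erase_bad (s : Bool) (xs : List Int) (k j : Nat)
    (hk : k + 1 < xs.length)
    (hbad : pvBand s (xs[k + 1] - xs[k]'(by omega)) = false)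
    (hj : j < xs.length) (hjk : j ≠ k) (hjk1 : j ≠ k + 1) :
    pvOk s (xs.eraseIdx j) = false := by
  by_contra h
  have hok : pvOk s (xs.eraseIdx j) = true := by
    cases hx : pvOk s (xs.eraseIdx j) with
    | false => exact absurd hx h
    | true => rfl
  have hall := (ok_iff s (xs.eraseIdx j)).mp hok
  have hlen : (xs.eraseIdx j).length = xs.length - 1 := by
    simp [List.length_eraseIdx, hj]
  rcases Nat.lt_or_ge j k with hlt | hge
  · -- j < k : the bad pair sits at index k-1 in the erased list
    have hk1 : 1 ≤ k := by omega
    have hm : (k - 1) + 1 < (xs.eraseIdx j).length := by omega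
    have := hall (k - 1) hm
    have e1 : (xs.eraseIdx j)[(k - 1) + 1]'(hm) = xs[k + 1] := by
      rw [List.getElem_eraseIdx]
      rw [dif_neg (by omega)]
      congr 1; omega
    have e2 : (xs.eraseIdx j)[k - 1]'(by omega) = xs[k]'(by omega) := by
      rw [List.getElem_eraseIdx]
      rw [dif_neg (by omega)]
      congr 1; omega
    rw [e1, e2] at this
    rw [this] at hbad
    exact absurd hbad (by simp)
  · -- j > k+1 : the bad pair sits at index k in the erased list
    have hgt : k + 1 < j := by omega
    have hm : k + 1 < (xs.eraseIdx j).length := by omega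
    have := hall k hm
    have e1 : (xs.eraseIdx j)[k + 1]'(hm) = xs[k + 1] := by
      rw [List.getElem_eraseIdx]; rw [dif_pos (by omega)]
    have e2 : (xs.eraseIdx j)[k]'(by omega) = xs[k]'(by omega) := by
      rw [List.getElem_eraseIdx]; rw [dif_pos (by omega)]
    rw [e1, e2] at this
    rw [this] at hbad
    exact absurd hbad (by simp)

-- Per direction, B's two candidate removals decide the whole existential over removals.
lemma tolerant_eq (s : Bool) (xs : List Int) :
    pvTolerant s xs
      = (pvOk s xs || (List.range xs.length).any fun i => pvOk s (xs.eraseIdx i)) := by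
  unfold pvTolerant
  cases hfb : pvFirstBad s xs with
  | none =>
    have := (firstBad_none s xs).mp hfb
    simp [this]
  | some i =>
    rcases firstBad_some s xs i hfb with ⟨hi, hbad⟩
    have hnotok : pvOk s xs = false := by
      cases hx : pvOk s xs with
      | true => exact absurd ((firstBad_none s xs).mpr hx) (by simp [hfb])
      | false => rfl
    rw [hnotok, Bool.false_or]
    show (pvOk s (List.take i xs ++ List.drop (i + 1) xs)
          || pvOk s (List.take (i + 1) xs ++ List.drop (i + 2) xs))
        = (List.range xs.length).any fun j => pvOk s (xs.eraseIdx j)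
    rw [← List.eraseIdx_eq_take_drop_succ xs i,
        ← List.eraseIdx_eq_take_drop_succ xs (i + 1)]
    rw [Bool.eq_iff_iff]
    simp only [Bool.or_eq_true, List.any_eq_true, List.mem_range]
    constructor
    · rintro (h | h)
      · exact ⟨i, by omega, h⟩
      · exact ⟨i + 1, by omega, h⟩
    · rintro ⟨j, hjlen, hjok⟩
      by_cases h1 : j = i
      · left; rw [← h1]; exact hjok
      by_cases h2 : j = i + 1
      · right; rw [← h2]; exact hjok
      · exact absurd hjok (by simp [erase_bad s xs i j hi hbad hjlen h1 h2])

-- ===== VERDICT (by name: the statement is the Claim_ definition above) =====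
theorem is_safe_report_with_tolerance_spec : Claim_equal_is_safe_report_with_tolerance := by
  intro xs _
  unfold Spec_is_safe_report_with_tolerance is_safe_report_with_tolerance
    is_safe_report_with_tolerance_alt
  simp only [tolerant_eq, safe_char]
  by_cases h : (pvOk true xs || pvOk false xs) = true
  · rw [if_pos h, Bool.eq_iff_iff]
    simp only [true_iff, Bool.or_eq_true]
    rcases (Bool.or_eq_true _ _).mp h with h' | h'
    · exact Or.inl (Or.inl h')
    · exact Or.inr (Or.inl h')
  · rw [if_neg h]
    have ht : pvOk true xs = false := by
      cases hx : pvOk true xs with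
      | false => rfl
      | true => exact absurd (by simp [hx]) h
    have hf : pvOk false xs = false := by
      cases hx : pvOk false xs with
      | false => rfl
      | true => exact absurd (by simp [hx]) h
    rw [Bool.eq_iff_iff]
    simp only [ht, hf, Bool.false_or, Bool.or_eq_true, List.any_eq_true, List.mem_range]
    constructor
    · rintro ⟨j, hj, hok⟩
      rcases hok with h' | h'
      · exact Or.inl ⟨j, hj, h'⟩
      · exact Or.inr ⟨j, hj, h'⟩
    · rintro (⟨j, hj, h'⟩ | ⟨j, hj, h'⟩)
      · exact ⟨j, hj, by simp [h']⟩
      · exact ⟨j, hj, by simp [h']⟩
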